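-- pv_equiv track=rewrite | github.com/DarksightKellar/HMS | fitness_evaluation/helpers.py | get_nth_event_numberings
-- ===== SOURCE A (Python) =====
-- def get_nth_event_numberings(n, schedule, numberings):
--     '''
--     For all numberings in  `numberings`,
--     get the numbering of the `n`th event in `schedule`, in a list
--
--     Returns `None` if there is no `n`th event
--     '''
--     events_encountered = 0
--     event_index = -1
--     event_numberings = []
--
--     search_start_index = 0
--
--     # Find index of event n
--     while events_encountered < n:
--         # e = [0,0,1,0,1]
--         try:
--             list_to_search = schedule[search_start_index : ]
--             event_index = list_to_search.index(1) + search_start_index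
--
--             # encountered an event
--             events_encountered += 1
--             if events_encountered == n:
--                 break
--
--             search_start_index = event_index + 1
--         except ValueError as e:
--             return None
--
--
--     for numbering in numberings:
--         event_numberings.append(numbering[event_index])
--
--     return event_numberings
-- ===== SOURCE B (Python) =====
-- def get_nth_event_numberings(n, schedule, numberings):
--     '''
--     For all numberings in `numberings`,
--     get the numbering of the `n`th event in `schedule`, in a list.
--
--     Returns `None` if there is no `n`th event.
--     '''
--     event_index = -1
--     if n > 0:
--         count = 0
--         for i, x in enumerate(schedule):
--             if x == 1:
--                 count += 1
--                 if count == n: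
--                     event_index = i
--                     break
--         else:
--             return None
--     return [numbering[event_index] for numbering in numberings]
-- ===== Notes on version B (the rewrite author's own statement) =====
-- stated objective: idiomatic
-- what changed: Replaces the while loop of repeated slice-copy-then-.index(1) searches with a single enumerate scan counting 1s (for-else for the not-found case), and the append loop with a comprehension.
import Mathlib
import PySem

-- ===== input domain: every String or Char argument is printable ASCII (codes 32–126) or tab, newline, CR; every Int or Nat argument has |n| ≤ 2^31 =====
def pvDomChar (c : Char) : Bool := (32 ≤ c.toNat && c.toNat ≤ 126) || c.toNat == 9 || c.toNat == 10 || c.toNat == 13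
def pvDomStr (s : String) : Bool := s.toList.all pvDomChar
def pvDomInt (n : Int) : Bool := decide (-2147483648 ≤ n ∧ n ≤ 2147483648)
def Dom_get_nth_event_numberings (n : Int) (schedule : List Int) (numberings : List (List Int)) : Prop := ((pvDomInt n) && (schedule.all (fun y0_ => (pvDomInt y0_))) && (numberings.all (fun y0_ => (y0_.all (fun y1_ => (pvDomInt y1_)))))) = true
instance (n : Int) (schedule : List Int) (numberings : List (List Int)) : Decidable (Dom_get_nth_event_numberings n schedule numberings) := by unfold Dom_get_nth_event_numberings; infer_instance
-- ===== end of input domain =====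

-- B replaces A's repeated slice+`.index(1)` search with a single counting enumerate scan; equal wherever A returns.


-- ===== PORT A =====
-- the while loop: events_encountered/event_index/search_start_index state; `none` = the ValueError path (return None)
def pvALoop (n : Int) (schedule : List Int) (events : Int) (eventIndex : Int) (searchStart : Int) : Option Int :=
  if _h : events < n then
    match PySem.List.index? (PySem.List.slice schedule (some searchStart) none) 1 with
    | none => none                     -- ValueError: return None
    | some j =>
      let eventIndex' : Int := (j : Int) + searchStart
      if events + 1 == n then some eventIndex'
      else pvALoop n schedule (events + 1) eventIndex' (eventIndex' + 1)
  else some eventIndex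
termination_by (n - events).toNat
decreasing_by omega

-- the append loop over numberings; `none` = IndexError at numbering[event_index] (excluded by Pre_)
def pvACollect (idx : Int) (nbs : List (List Int)) (acc : List Int) : Option (List Int) :=
  match nbs with
  | [] => some acc
  | nb :: rest =>
    match PySem.List.pyGet? nb idx with
    | none => none
    | some v => pvACollect idx rest (acc ++ [v])

def get_nth_event_numberings (n : Int) (schedule : List Int) (numberings : List (List Int)) : Option (List Int) :=
  match pvALoop n schedule 0 (-1) 0 with
  | none => none
  | some idx => pvACollect idx numberings []

-- ===== PORT B =====
-- single scan over `enumerate(schedule)` counting 1s; `none` = the for-else `return None`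
def pvBScan (n : Int) : List Int → Int → Int → Option Int
  | [], _, _ => none
  | x :: rest, i, count =>
    if x == 1 then
      if count + 1 == n then some i
      else pvBScan n rest (i + 1) (count + 1)
    else pvBScan n rest (i + 1) count

-- the comprehension [numbering[event_index] for numbering in numberings]; `none` = IndexError (excluded by Pre_)
def pvBCollect (idx : Int) : List (List Int) → Option (List Int)
  | [] => some []
  | nb :: rest => do
      let v ← PySem.List.pyGet? nb idx
      let vs ← pvBCollect idx rest
      pure (v :: vs)

def get_nth_event_numberings_alt (n : Int) (schedule : List Int) (numberings : List (List Int)) : Option (List Int) :=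
  if n > 0 then
    match pvBScan n schedule 0 0 with
    | none => none
    | some idx => pvBCollect idx numberings
  else pvBCollect (-1) numberings

-- ===== PRECONDITION & SPEC =====
-- Pre_ excludes exactly the inputs where Python A raises IndexError at numbering[event_index]:
-- for n ≤ 0 the index is -1 (so every numbering must be nonempty); for n ≥ 1 the index k of the n-th 1
-- in schedule must be in range of every numbering.
def Pre_get_nth_event_numberings (n : Int) (schedule : List Int) (numberings : List (List Int)) : Prop :=
  (n ≤ 0 → ∀ nb ∈ numberings, nb ≠ []) ∧
  (∀ k ∈ List.range schedule.length, schedule.getD k 0 = 1 →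
      ((schedule.take (k + 1)).count 1 : Int) = n → ∀ nb ∈ numberings, k < nb.length)
instance (n : Int) (schedule : List Int) (numberings : List (List Int)) : Decidable (Pre_get_nth_event_numberings n schedule numberings) := by unfold Pre_get_nth_event_numberings; infer_instance

def pvWitness_get_nth_event_numberings : Int × List Int × List (List Int) := (2, [0, 1, 1, 0], [[5, 6, 7], [8, 9, 10]])

def Spec_get_nth_event_numberings (n : Int) (schedule : List Int) (numberings : List (List Int)) (out : Option (List Int)) : Prop := out = get_nth_event_numberings_alt n schedule numberings
instance (n : Int) (schedule : List Int) (numberings : List (List Int)) (out : Option (List Int)) : Decidable (Spec_get_nth_event_numberings n schedule numberings out) := by unfold Spec_get_nth_event_numberings; infer_instance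

-- ===== CLAIM (what is proved, stated in full; the proofs are below) =====
def Claim_equal_get_nth_event_numberings : Prop := ∀ (n : Int) (schedule : List Int) (numberings : List (List Int)), Dom_get_nth_event_numberings n schedule numberings → Pre_get_nth_event_numberings n schedule numberings → Spec_get_nth_event_numberings n schedule numberings (get_nth_event_numberings n schedule numberings)

-- ===== LEMMAS AND PROOFS =====

-- the two collection loops agree (both model IndexError as none)
theorem pvCollect_eq (idx : Int) (nbs : List (List Int)) (acc : List Int) :
    pvACollect idx nbs acc = (pvBCollect idx nbs).map (acc ++ ·) := by
  induction nbs generalizing acc with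
  | nil => simp [pvACollect, pvBCollect]
  | cons nb rest ih =>
    simp only [pvACollect, pvBCollect]
    cases PySem.List.pyGet? nb idx with
    | none => simp
    | some v =>
      show pvACollect idx rest (acc ++ [v]) = _
      rw [ih]
      cases pvBCollect idx rest <;> simp

theorem pvBScan_no_one (n : Int) (l : List Int) (i c : Int) (h : (1 : Int) ∉ l) :
    pvBScan n l i c = none := by
  induction l generalizing i with
  | nil => rfl
  | cons x rest ih =>
    simp only [List.mem_cons, not_or] at h
    simp only [pvBScan, beq_iff_eq]
    rw [if_neg (by exact fun hx => h.1 hx.symm)]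
    exact ih (i + 1) h.2

theorem pvBScan_skip (n : Int) (pre l : List Int) (i c : Int) (h : (1 : Int) ∉ pre) :
    pvBScan n (pre ++ l) i c = pvBScan n l (i + pre.length) c := by
  induction pre generalizing i with
  | nil => simp
  | cons x rest ih =>
    simp only [List.mem_cons, not_or] at h
    simp only [List.cons_append, pvBScan, beq_iff_eq]
    rw [if_neg (by exact fun hx => h.1 hx.symm)]
    rw [ih (i + 1) h.2]
    congr 1
    simp only [List.length_cons]
    push_cast
    ring

theorem pvALoop_eq_bScan (n : Int) (schedule : List Int) :
    ∀ (k : Nat) (s e idx : Int), (n - e).toNat ≤ k → 0 ≤ s → e < n →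
      pvALoop n schedule e idx s = pvBScan n (schedule.drop s.toNat) s e := by
  intro k
  induction k with
  | zero => intro s e idx hk _ he; omega
  | succ k ih =>
    intro s e idx hk hs he
    rw [pvALoop, dif_pos he, PySem.List.slice_from schedule hs]
    cases hidx : PySem.List.index? (schedule.drop s.toNat) 1 with
    | none =>
      rw [PySem.List.index?_eq_none_iff] at hidx
      rw [pvBScan_no_one n _ s e hidx]
    | some j =>
      rw [PySem.List.index?_eq_some_iff] at hidx
      obtain ⟨pre, suf, hdrop, hlen, hnot⟩ := hidx
      rw [hdrop, pvBScan_skip n pre _ s e hnot, hlen]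
      simp only [pvBScan, beq_self_eq_true, if_true, beq_iff_eq]
      by_cases hn : e + 1 = n
      · rw [if_pos hn, if_pos hn]
        congr 1
        ring
      · rw [if_neg hn, if_neg hn]
        rw [ih ((j : Int) + s + 1) (e + 1) ((j : Int) + s) (by omega) (by omega) (by omega)]
        have hdrop2 : schedule.drop ((j : Int) + s + 1).toNat = suf := by
          have h1 : ((j : Int) + s + 1).toNat = s.toNat + (j + 1) := by omega
          have h2 : pre ++ 1 :: suf = (pre ++ [1]) ++ suf := by simp
          have h3 : j + 1 = (pre ++ ([1] : List Int)).length := by simp [hlen]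
          rw [h1, ← List.drop_drop, hdrop, h2, h3, List.drop_left]
        rw [hdrop2]
        congr 1
        ring

-- ===== VERDICT (by name: the statement is the Claim_ definition above) =====
theorem get_nth_event_numberings_spec : Claim_equal_get_nth_event_numberings := by
  intro n schedule numberings _ _
  unfold Spec_get_nth_event_numberings get_nth_event_numberings get_nth_event_numberings_alt
  by_cases hn : 0 < n
  · rw [if_pos hn]
    rw [pvALoop_eq_bScan n schedule (n - 0).toNat 0 0 (-1) (le_refl _) (le_refl 0) hn]
    simp only [Int.toNat_zero, List.drop_zero]
    cases pvBScan n schedule 0 0 with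
    | none => rfl
    | some idx =>
      simp only
      rw [pvCollect_eq]
      cases pvBCollect idx numberings <;> simp
  · rw [if_neg hn]
    rw [pvALoop, dif_neg (by omega)]
    simp only
    rw [pvCollect_eq]
    cases pvBCollect (-1) numberings <;> simp
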